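-- pv_equiv track=rewrite | github.com/on15floor/proxy-tools | grab_sites/nntime_com.py | get_delimiter
-- ===== SOURCE A (Python) =====
-- def get_delimiter(delimiter_trash):
--     delimiter_list = []
--     for i in range(0, delimiter_trash.__len__()):
--         delimiter_list += [delimiter_trash[i][-6:-4]]
--
--     frequency, delimiter = 0, 0
--     for d in delimiter_list:
--         c = delimiter_list.count(d)
--         if c > frequency:
--             frequency, delimiter = c, d
--
--     return delimiter
-- ===== SOURCE B (Python) =====
-- def get_delimiter(delimiter_trash):
--     # Sort-and-group: stable lexicographic sort of (substring, index) pairs,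
--     # one scan grouping equal-value runs (count + first original index),
--     # then pick the run with max count, ties broken by smallest first index.
--     subs = [s[-6:-4] for s in delimiter_trash]
--     if not subs:
--         return 0
--     pairs = sorted(zip(subs, range(len(subs))))
--     runs = []
--     for v, i in pairs:
--         if runs and runs[-1][0] == v:
--             last = runs[-1]
--             runs[-1] = (v, last[1] + 1, last[2])
--         else:
--             runs.append((v, 1, i))
--     best = runs[0]
--     for r in runs[1:]:
--         if r[1] > best[1] or (r[1] == best[1] and r[2] < best[2]):
--             best = r
--     return best[0]
-- ===== Notes on version B (the rewrite author's own statement) =====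
-- stated objective: faster
-- what changed: A rescans the whole substring list with .count for every element (quadratic); B instead sorts the (substring, index) pairs lexicographically, groups consecutive equal-value runs in one scan (run length = count, run head index = first occurrence) and picks the run with the largest count, ties to the smallest first index, never calling .count.
-- outside the precondition, e.g. on get_delimiter([]): A returns 0, B returns 0
import Mathlib
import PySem

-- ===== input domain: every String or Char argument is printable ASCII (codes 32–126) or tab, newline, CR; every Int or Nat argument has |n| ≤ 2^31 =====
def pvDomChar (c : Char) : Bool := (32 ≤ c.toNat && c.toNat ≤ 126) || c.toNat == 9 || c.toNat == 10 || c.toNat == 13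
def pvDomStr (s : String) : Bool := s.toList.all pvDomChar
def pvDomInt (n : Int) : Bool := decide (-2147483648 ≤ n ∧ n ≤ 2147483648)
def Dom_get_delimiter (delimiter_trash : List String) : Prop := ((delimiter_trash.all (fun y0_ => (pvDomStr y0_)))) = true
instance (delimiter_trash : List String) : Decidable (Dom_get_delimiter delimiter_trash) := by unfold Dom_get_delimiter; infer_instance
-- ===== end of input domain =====

-- B replaces A's quadratic .count-in-a-loop by a sort of the (substring, index) pairs followed
-- by one scan grouping equal-value runs (count + first index) and one scan picking the best run;
-- same value, same first-occurrence tie-break.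

-- ===== PORT A =====
-- literal transliteration of A; Python's initial 'delimiter = 0' (an int) is represented by
-- "" — on the empty list A returns the int 0, not a string, which Pre_ excludes.
def get_delimiter (delimiter_trash : List String) : String :=
  let delimiter_list : List String :=
    (PySem.List.pyRange 0 (PySem.List.len delimiter_trash) 1).foldl
      (fun acc i =>
        acc ++ [PySem.Str.slice (PySem.List.pyGetD delimiter_trash i "") (some (-6)) (some (-4))])
      []
  let r : Int × String :=
    delimiter_list.foldl
      (fun p d =>
        let c : Int := PySem.List.count delimiter_list d
        if c > p.1 then (c, d) else p)
      (0, "")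
  r.2

-- ===== PORT B =====
-- transliteration of Source B: sorted (value, index) pairs, a grouping pass building the runs
-- list (append / modify-last, as the Python does), then a scan over runs[1:] from runs[0].
-- The two '=> ""' branches are unreachable totalisation guards (subs ≠ [] ⇒ runs ≠ []).
def get_delimiter_alt (delimiter_trash : List String) : String :=
  let subs := delimiter_trash.map (fun s => PySem.Str.slice s (some (-6)) (some (-4)))
  if subs = [] then ""
  else
    let pairs := List.zip subs (PySem.List.pyRange 0 (PySem.List.len subs) 1)
    let sortedPairs := PySem.List.sorted2 pairs (fun p => p.1) (fun p => p.2)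
    let runs : List (String × Int × Int) :=
      sortedPairs.foldl
        (fun acc p =>
          match acc.getLast? with
          | some last =>
              if last.1 == p.1 then acc.dropLast ++ [(p.1, last.2.1 + 1, last.2.2)]
              else acc ++ [(p.1, 1, p.2)]
          | none => [(p.1, 1, p.2)])
        []
    match runs with
    | [] => ""
    | b0 :: rest =>
        (rest.foldl
          (fun b r => if r.2.1 > b.2.1 ∨ (r.2.1 = b.2.1 ∧ r.2.2 < b.2.2) then r else b)
          b0).1

-- ===== PRECONDITION & SPEC =====
-- Pre_ excludes only the empty list, on which A (and the Python B) return the integer 0 — not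
-- a value of the declared string return type.
def Pre_get_delimiter (delimiter_trash : List String) : Prop := delimiter_trash ≠ []
instance (delimiter_trash : List String) : Decidable (Pre_get_delimiter delimiter_trash) := by
  unfold Pre_get_delimiter; infer_instance

def pvWitness_get_delimiter : List String := ["12ab.html", "34ab.html", "99xy.html"]

def Spec_get_delimiter (delimiter_trash : List String) (out : String) : Prop :=
  out = get_delimiter_alt delimiter_trash
instance (delimiter_trash : List String) (out : String) :
    Decidable (Spec_get_delimiter delimiter_trash out) := by
  unfold Spec_get_delimiter; infer_instance

-- ===== CLAIM =====
def Claim_equal_get_delimiter : Prop :=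
  ∀ (delimiter_trash : List String), Dom_get_delimiter delimiter_trash →
    Pre_get_delimiter delimiter_trash →
      Spec_get_delimiter delimiter_trash (get_delimiter delimiter_trash)

-- ===== LEMMAS AND PROOFS =====

-- The value both programs return: the first-occurring most frequent element of `subs`.
-- pvBest subs w : w occurs in subs, no element is more frequent, and among equally frequent
-- elements w's first occurrence is earliest.
def pvBest (subs : List String) (w : String) : Prop :=
  w ∈ subs ∧ ∀ u ∈ subs,
    List.count u subs ≤ List.count w subs ∧
    (List.count u subs = List.count w subs → List.idxOf w subs ≤ List.idxOf u subs)

theorem pvBest_unique {subs : List String} {w₁ w₂ : String}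
    (h₁ : pvBest subs w₁) (h₂ : pvBest subs w₂) : w₁ = w₂ := by
  obtain ⟨m₁, hb₁⟩ := h₁
  obtain ⟨m₂, hb₂⟩ := h₂
  have hc₁ := hb₁ w₂ m₂
  have hc₂ := hb₂ w₁ m₁
  have hcnt : List.count w₁ subs = List.count w₂ subs := le_antisymm hc₂.1 hc₁.1
  have hidx : List.idxOf w₁ subs = List.idxOf w₂ subs :=
    le_antisymm (hc₁.2 hcnt.symm) (hc₂.2 hcnt)
  exact (List.idxOf_inj m₁).mp hidx

-- ---------- A side ----------

-- invariant of A's selection loop over the prefix t of subs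
def pvInvA (subs t : List String) (p : Int × String) : Prop :=
  (t = [] ∧ p = (0, "")) ∨
  (p.2 ∈ t ∧ p.1 = (List.count p.2 subs : Int) ∧ List.idxOf p.2 subs < t.length ∧
    ∀ u ∈ t, (List.count u subs : Int) ≤ p.1 ∧
      ((List.count u subs : Int) = p.1 → List.idxOf p.2 subs ≤ List.idxOf u subs))

theorem pvFoldA (subs : List String) (l t : List String) (p : Int × String)
    (hsub : subs = t ++ l) (hp : pvInvA subs t p) :
    pvInvA subs (t ++ l)
      (l.foldl (fun p d => if ((List.count d subs : Nat) : Int) > p.1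
          then (((List.count d subs : Nat) : Int), d) else p) p) := by
  induction l generalizing t p with
  | nil => simpa using hp
  | cons d l' ih =>
      have hsub' : subs = (t ++ [d]) ++ l' := by simpa using hsub
      have hstep : pvInvA subs (t ++ [d])
          (if ((List.count d subs : Nat) : Int) > p.1
            then (((List.count d subs : Nat) : Int), d) else p) := by
        have hdmem : d ∈ subs := by rw [hsub]; simp
        have hidxd_le : d ∉ t → List.idxOf d subs = t.length := by
          intro hdt
          rw [hsub, List.idxOf_append, if_neg hdt]
          · simp [List.idxOf_cons_self]
        by_cases hfire : ((List.count d subs : Nat) : Int) > p.1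
        · rw [if_pos hfire]
          -- d cannot already be in t
          have hdt : d ∉ t := by
            intro hdt
            rcases hp with ⟨ht, -⟩ | ⟨-, -, -, hall⟩
            · exact absurd (ht ▸ hdt) (List.not_mem_nil)
            · exact absurd hfire (not_lt.mpr (hall d hdt).1)
          refine Or.inr ⟨by simp, rfl, ?_, ?_⟩
          · rw [hidxd_le hdt]; simp
          · intro u hu
            rcases List.mem_append.mp hu with hu | hu
            · rcases hp with ⟨ht, -⟩ | ⟨-, -, -, hall⟩
              · exact absurd (ht ▸ hu) (List.not_mem_nil)
              · have := (hall u hu).1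
                constructor
                · omega
                · intro hequ; omega
            · simp only [List.mem_singleton] at hu
              subst hu; exact ⟨le_refl _, fun _ => le_refl _⟩
        · rw [if_neg hfire]
          rcases hp with ⟨ht, hpz⟩ | ⟨hmem, hcnt, hidx, hall⟩
          · -- impossible: count d subs ≥ 1 > 0 = p.1
            exfalso
            have h1 : 0 < List.count d subs := List.count_pos_iff.mpr hdmem
            rw [hpz] at hfire
            simp only [not_lt] at hfire
            omega
          · refine Or.inr ⟨List.mem_append.mpr (Or.inl hmem), hcnt, ?_, ?_⟩
            · simp; omega
            · intro u hu
              rcases List.mem_append.mp hu with hu | hu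
              · exact hall u hu
              · simp only [List.mem_singleton] at hu
                rw [hu]
                refine ⟨by omega, ?_⟩
                intro hequ
                by_cases hdt : d ∈ t
                · exact (hall d hdt).2 hequ
                · rw [hidxd_le hdt]; omega
      have := ih (t ++ [d]) _ hsub' hstep
      simpa using this
theorem pvA_best (subs : List String) (hne : subs ≠ []) :
    pvBest subs
      ((subs.foldl (fun p d => if ((List.count d subs : Nat) : Int) > p.1
          then (((List.count d subs : Nat) : Int), d) else p) ((0 : Int), "")).2) := by
  have h := pvFoldA subs subs [] ((0 : Int), "") (by simp) (Or.inl ⟨rfl, rfl⟩)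
  simp only [List.nil_append] at h
  rcases h with ⟨ht, -⟩ | ⟨hmem, hcnt, -, hall⟩
  · exact absurd ht hne
  · refine ⟨hmem, ?_⟩
    intro u hu
    obtain ⟨h1, h2⟩ := hall u hu
    rw [hcnt] at h1 h2
    constructor
    · exact_mod_cast h1
    · intro he; exact h2 (by exact_mod_cast he)
-- ---------- B side ----------

-- the partition of a pair list by the distinct values V is a permutation of it
theorem pvPartitionPerm (V : List String) (l : List (String × Int))
    (hnd : V.Nodup) (hcov : ∀ p ∈ l, p.1 ∈ V) :
    (V.flatMap fun v => l.filter (fun p => p.1 == v)).Perm l := by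
  induction V generalizing l with
  | nil =>
      have : l = [] := by
        cases l with
        | nil => rfl
        | cons p t => exact absurd (hcov p (by simp)) (List.not_mem_nil)
      simp [this]
  | cons v V' ih =>
      rw [List.flatMap_cons]
      have hnd' : V'.Nodup := hnd.of_cons
      have hv : v ∉ V' := by simpa using (List.nodup_cons.mp hnd).1
      set l₂ := l.filter (fun p => !(p.1 == v)) with hl₂
      have hrw : (V'.flatMap fun u => l.filter (fun p => p.1 == u))
          = V'.flatMap fun u => l₂.filter (fun p => p.1 == u) := by
        apply List.flatMap_congr
        intro u hu
        rw [hl₂, List.filter_filter]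
        apply List.filter_congr
        intro p hp
        by_cases hpu : p.1 = u
        · have huv : ¬ u = v := by rintro rfl; exact hv hu
          simp [hpu, huv]
        · simp [hpu]
      rw [hrw]
      have hcov₂ : ∀ p ∈ l₂, p.1 ∈ V' := by
        intro p hp
        obtain ⟨hpl, hne⟩ := List.mem_filter.mp hp
        have := hcov p hpl
        simp only [List.mem_cons] at this
        rcases this with h | h
        · simp [h] at hne
        · exact h
      exact ((ih l₂ hnd' hcov₂).append_left _).trans (List.filter_append_perm _ l)
-- sorted2 with fst/snd keys is sorted with the lexicographic key
theorem pvSorted2_lex (l : List (String × Int)) :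
    PySem.List.sorted2 l (fun p => p.1) (fun p => p.2) =
      PySem.List.sorted l (fun p => (toLex (p.1, p.2) : Lex (String × Int))) := by
  simp only [PySem.List.sorted2, PySem.List.sorted]
  congr 1
  funext acc x
  congr 1
  funext a b
  by_cases h1 : a.1 < b.1
  · simp [h1, Prod.Lex.lt_iff]
  · by_cases h2 : b.1 < a.1
    · have : ¬ (toLex (a.1, a.2) < toLex (b.1, b.2)) := by
        rw [Prod.Lex.lt_iff]; push Not
        exact ⟨h1, fun he => absurd he.symm (ne_of_lt h2)⟩
      simp [h1, h2, this]
    · have heq : a.1 = b.1 := le_antisymm (not_lt.mp h2) (not_lt.mp h1)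
      by_cases h3 : a.2 < b.2
      · have : toLex (a.1, a.2) < toLex (b.1, b.2) := by
          rw [Prod.Lex.lt_iff]; exact Or.inr ⟨heq, h3⟩
        simp [h1, h2, h3, this]
      · have : ¬ (toLex (a.1, a.2) < toLex (b.1, b.2)) := by
          rw [Prod.Lex.lt_iff]; push Not
          exact ⟨h1, fun _ => not_lt.mp h3⟩
        simp [h1, h2, h3, this]
-- per-value slice of zipIdx: length = count, head = (v, k + first index)
theorem pvZipIdxFilter (l : List String) (v : String) (k : Nat) :
    ((l.zipIdx k).filter (fun q => q.1 == v)).length = List.count v l ∧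
    (v ∈ l → ((l.zipIdx k).filter (fun q => q.1 == v)).head? =
        some (v, k + List.idxOf v l)) := by
  induction l generalizing k with
  | nil => simp
  | cons a t ih =>
      rw [List.zipIdx_cons]
      by_cases hav : a = v
      · subst hav
        constructor
        · simp only [List.filter_cons]
          simp [(ih (k+1)).1]
        · intro _
          simp [List.idxOf_cons_self]
      · have hb : ((a, k).1 == v) = false := by simp [hav]
        constructor
        · simp only [List.filter_cons, hb, Bool.false_eq_true, if_false]
          simp [(ih (k+1)).1, hav]
        · intro hv
          have hvt : v ∈ t := by
            rcases List.mem_cons.mp hv with h | h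
            · exact absurd h.symm hav
            · exact h
          simp only [List.filter_cons, hb, Bool.false_eq_true, if_false]
          rw [(ih (k+1)).2 hvt, List.idxOf_cons_ne _ hav]
          congr 2
          omega
-- grouping fold, inside one run
theorem pvFoldRun (b : List (String × Int)) (acc₀ : List (String × Int × Int))
    (v : String) (c0 i0 : Int) (hb : ∀ p ∈ b, p.1 = v) :
    b.foldl (fun acc p =>
        match acc.getLast? with
        | some last =>
            if last.1 == p.1 then acc.dropLast ++ [(p.1, last.2.1 + 1, last.2.2)]
            else acc ++ [(p.1, 1, p.2)]
        | none => [(p.1, 1, p.2)]) (acc₀ ++ [(v, c0, i0)])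
      = acc₀ ++ [(v, c0 + b.length, i0)] := by
  induction b generalizing c0 with
  | nil => simp
  | cons p t ih =>
      have hp1 : p.1 = v := hb p (by simp)
      rw [List.foldl_cons]
      simp only [List.getLast?_concat, hp1, beq_self_eq_true, if_true, List.dropLast_concat]
      rw [ih (c0 + 1) (fun q hq => hb q (by simp [hq]))]
      congr 3
      simp
      ring
-- grouping fold, over the list of runs
theorem pvFoldBlocks (B : String → List (String × Int)) (cN : String → Nat) (fI : String → Int)
    (V : List String) (acc : List (String × Int × Int))
    (hne : ∀ v ∈ V, ∃ t, B v = (v, fI v) :: t)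
    (hfst : ∀ v ∈ V, ∀ p ∈ B v, p.1 = v)
    (hlen : ∀ v ∈ V, (B v).length = cN v)
    (hacc : ∀ r, acc.getLast? = some r → r.1 ∉ V)
    (hnd : V.Nodup) :
    (V.flatMap B).foldl (fun acc p =>
        match acc.getLast? with
        | some last =>
            if last.1 == p.1 then acc.dropLast ++ [(p.1, last.2.1 + 1, last.2.2)]
            else acc ++ [(p.1, 1, p.2)]
        | none => [(p.1, 1, p.2)]) acc
      = acc ++ V.map (fun v => (v, (cN v : Int), fI v)) := by
  induction V generalizing acc with
  | nil => simp
  | cons v V' ih =>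
      rw [List.flatMap_cons, List.foldl_append]
      obtain ⟨t, hBv⟩ := hne v (by simp)
      have hfstv := hfst v (by simp)
      have hblock :
          (B v).foldl (fun acc p =>
            match acc.getLast? with
            | some last =>
                if last.1 == p.1 then acc.dropLast ++ [(p.1, last.2.1 + 1, last.2.2)]
                else acc ++ [(p.1, 1, p.2)]
            | none => [(p.1, 1, p.2)]) acc
          = acc ++ [(v, (cN v : Int), fI v)] := by
        rw [hBv, List.foldl_cons]
        have hstep :
            (match acc.getLast? with
              | some last =>
                  if last.1 == (v, fI v).1 then acc.dropLast ++ [((v, fI v).1, last.2.1 + 1, last.2.2)]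
                  else acc ++ [((v, fI v).1, 1, (v, fI v).2)]
              | none => [((v, fI v).1, 1, (v, fI v).2)]) = acc ++ [(v, 1, fI v)] := by
          cases hL : acc.getLast? with
          | none => simp [List.getLast?_eq_none_iff.mp hL]
          | some r =>
              have : r.1 ≠ v := fun h => (hacc r hL) (by simp [h])
              simp [this]
        rw [hstep, pvFoldRun t acc v 1 (fI v) (fun q hq => hfstv q (by simp [hBv, hq]))]
        have hc : (1 : Int) + t.length = (cN v : Int) := by
          have := hlen v (by simp)
          rw [hBv] at this
          simp at this
          omega
        rw [hc]
      rw [hblock]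
      rw [ih (acc ++ [(v, (cN v : Int), fI v)]) (fun u hu => hne u (by simp [hu])) (fun u hu => hfst u (by simp [hu]))
          (fun u hu => hlen u (by simp [hu])) ?_ hnd.of_cons]
      · simp
      · intro r hr
        rw [List.getLast?_concat] at hr
        cases hr
        have : v ∉ V' := by simpa using (List.nodup_cons.mp hnd).1
        simpa using this
-- the selection scan returns the run with maximal count, ties to the smaller first index
theorem pvSelect (rest : List (String × Int × Int)) (b0 : String × Int × Int) :
    (rest.foldl (fun b r => if r.2.1 > b.2.1 ∨ (r.2.1 = b.2.1 ∧ r.2.2 < b.2.2) then r else b) b0)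
        ∈ b0 :: rest ∧
    ∀ r ∈ b0 :: rest,
      r.2.1 ≤ (rest.foldl (fun b r => if r.2.1 > b.2.1 ∨ (r.2.1 = b.2.1 ∧ r.2.2 < b.2.2) then r else b) b0).2.1 ∧
      (r.2.1 = (rest.foldl (fun b r => if r.2.1 > b.2.1 ∨ (r.2.1 = b.2.1 ∧ r.2.2 < b.2.2) then r else b) b0).2.1 →
        (rest.foldl (fun b r => if r.2.1 > b.2.1 ∨ (r.2.1 = b.2.1 ∧ r.2.2 < b.2.2) then r else b) b0).2.2 ≤ r.2.2) := by
  induction rest generalizing b0 with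
  | nil =>
      refine ⟨by simp, ?_⟩
      intro r hr
      simp only [List.mem_singleton] at hr
      subst hr
      simp [List.foldl_nil]
  | cons b1 rest' ih =>
      rw [List.foldl_cons]
      set b0' := if b1.2.1 > b0.2.1 ∨ (b1.2.1 = b0.2.1 ∧ b1.2.2 < b0.2.2) then b1 else b0 with hb0'
      obtain ⟨hmem, hbeats⟩ := ih b0'
      have hb0'cases : b0' = b1 ∨ b0' = b0 := by
        rw [hb0']; split_ifs <;> simp
      constructor
      · rcases List.mem_cons.mp hmem with h | h
        · rcases hb0'cases with hc | hc <;> rw [hc] at h ⊢ <;> rw [h] <;> simp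
        · simp [h]
      · intro r hr
        have hres := hbeats b0' (by simp)
        -- b0' beats both b0 and b1
        have hbb : ∀ x, (x = b0 ∨ x = b1) →
            x.2.1 ≤ b0'.2.1 ∧ (x.2.1 = b0'.2.1 → b0'.2.2 ≤ x.2.2) := by
          intro x hx
          rw [hb0']
          split_ifs with hcond
          · rcases hx with rfl | rfl
            · constructor
              · rcases hcond with h | h
                · omega
                · omega
              · intro he
                rcases hcond with h | h
                · omega
                · omega
            · exact ⟨le_refl _, fun _ => le_refl _⟩
          · rcases hx with rfl | rfl
            · exact ⟨le_refl _, fun _ => le_refl _⟩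
            · push Not at hcond
              constructor
              · omega
              · intro he
                have := hcond.2 he
                omega
        rcases List.mem_cons.mp hr with rfl | hr2
        · obtain ⟨h1, h2⟩ := hbb r (Or.inl rfl)
          constructor
          · omega
          · intro he
            have hq1 : b0'.2.1 = _ := le_antisymm hres.1 (by omega)
            have := hres.2 hq1
            have := h2 (by omega)
            omega
        · rcases List.mem_cons.mp hr2 with rfl | hr3
          · obtain ⟨h1, h2⟩ := hbb r (Or.inr rfl)
            constructor
            · omega
            · intro he
              have hq1 : b0'.2.1 = _ := le_antisymm hres.1 (by omega)
              have := hres.2 hq1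
              have := h2 (by omega)
              omega
          · exact hbeats r (by simp [hr3])
theorem pvB_best (xs : List String) (hne : xs ≠ []) :
    pvBest (xs.map (fun s => PySem.Str.slice s (some (-6)) (some (-4))))
      (get_delimiter_alt xs) := by
  set subs := xs.map (fun s => PySem.Str.slice s (some (-6)) (some (-4))) with hsubs
  have hsne : subs ≠ [] := by simp [hsubs, hne]
  -- the pair list
  have hpairs : List.zip subs (PySem.List.pyRange 0 (PySem.List.len subs) 1)
      = (subs.zipIdx).map (Prod.map id (fun k : Nat => (k : Int))) := by
    have hlen : PySem.List.len subs = ((subs.length : Nat) : Int) := by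
      simp [PySem.List.len]
    rw [hlen, PySem.List.pyRange_zero_natCast, List.zip_map_right,
      List.zipIdx_eq_zip_range', ← List.range_eq_range']
  set pairs := (subs.zipIdx).map (Prod.map id (fun k : Nat => (k : Int))) with hpairsdef
  -- pairs has strictly increasing second components
  have hpw2 : pairs.Pairwise (fun p q : String × Int => p.2 < q.2) := by
    rw [hpairsdef, List.pairwise_map]
    rw [List.pairwise_iff_getElem]
    intro i j hi hj hij
    rw [List.getElem_zipIdx, List.getElem_zipIdx]
    simp only [Prod.map_apply]
    omega
  -- the distinct values, sorted
  set V := PySem.List.sorted (PySem.Set.ofList subs) (fun v => v) false with hV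
  have hVperm : V.Perm (PySem.Set.ofList subs) := PySem.List.sorted_perm _ _ _
  have hVnd : V.Nodup := hVperm.nodup_iff.mpr (PySem.Set.nodup_ofList subs)
  have hVmem : ∀ u, u ∈ V ↔ u ∈ subs := by
    intro u
    rw [hVperm.mem_iff, PySem.Set.mem_ofList]
  have hVlt : V.Pairwise (· < ·) := PySem.List.sorted_ofList_pairwise_lt subs
  -- the sorted pair list is the concatenation of the per-value blocks
  have hsorted : PySem.List.sorted2 pairs (fun p => p.1) (fun p => p.2)
      = V.flatMap (fun v => pairs.filter (fun p => p.1 == v)) := by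
    rw [pvSorted2_lex]
    apply PySem.List.sorted_eq_of_perm_of_pairwise_lt
    · apply pvPartitionPerm V pairs hVnd
      intro p hp
      rw [hVmem]
      rw [hpairsdef] at hp
      obtain ⟨q, hq, rfl⟩ := List.mem_map.mp hp
      have := (List.of_mem_zip (List.zipIdx_eq_zip_range' ▸ hq)).1
      simpa using this
    · rw [List.pairwise_flatMap]
      constructor
      · intro v hv
        have hfil : (pairs.filter (fun p => p.1 == v)).Pairwise (fun p q : String × Int => p.2 < q.2) :=
          hpw2.filter _
        refine hfil.imp_of_mem ?_
        intro a b ha hb hlt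
        have ha1 : a.1 = v := by simpa using (List.mem_filter.mp ha).2
        have hb1 : b.1 = v := by simpa using (List.mem_filter.mp hb).2
        rw [Prod.Lex.lt_iff]
        simp only [ofLex_toLex]
        exact Or.inr ⟨by rw [ha1, hb1], hlt⟩
      · refine hVlt.imp ?_
        intro v1 v2 h12 x hx y hy
        have hx1 : x.1 = v1 := by simpa using (List.mem_filter.mp hx).2
        have hy1 : y.1 = v2 := by simpa using (List.mem_filter.mp hy).2
        rw [Prod.Lex.lt_iff]
        simp only [ofLex_toLex]
        exact Or.inl (by rw [hx1, hy1]; exact h12)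
  -- the per-value blocks
  have hblk : ∀ v ∈ V, pairs.filter (fun p => p.1 == v)
      = ((subs.zipIdx.filter (fun q => q.1 == v)).map (Prod.map id (fun k : Nat => (k : Int)))) := by
    intro v _
    rw [hpairsdef, List.filter_map]
    rfl
  -- runs
  have hruns : (PySem.List.sorted2 pairs (fun p => p.1) (fun p => p.2)).foldl
      (fun acc p =>
        match acc.getLast? with
        | some last =>
            if last.1 == p.1 then acc.dropLast ++ [(p.1, last.2.1 + 1, last.2.2)]
            else acc ++ [(p.1, 1, p.2)]
        | none => [(p.1, 1, p.2)]) ([] : List (String × Int × Int))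
      = V.map (fun v => (v, (List.count v subs : Int), ((List.idxOf v subs : Nat) : Int))) := by
    rw [hsorted]
    have := pvFoldBlocks (fun v => pairs.filter (fun p => p.1 == v))
      (fun v => List.count v subs) (fun v => ((List.idxOf v subs : Nat) : Int)) V []
      ?_ ?_ ?_ (by simp) hVnd
    · rw [List.nil_append] at this
      exact this
    · intro v hv
      beta_reduce
      have hvs : v ∈ subs := (hVmem v).mp hv
      rw [hblk v hv]
      obtain ⟨hl, hh⟩ := pvZipIdxFilter subs v 0
      have hh' := hh hvs
      cases hzf : (subs.zipIdx.filter (fun q => q.1 == v)) with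
      | nil => rw [hzf] at hh'; simp at hh'
      | cons q t =>
          rw [hzf] at hh'
          simp only [List.head?_cons, Option.some.injEq] at hh'
          refine ⟨t.map (Prod.map id (fun k : Nat => (k : Int))), ?_⟩
          rw [List.map_cons, hh']
          simp [Prod.map]
    · intro v hv p hp
      beta_reduce at hp
      rw [hblk v hv] at hp
      obtain ⟨q, hq, rfl⟩ := List.mem_map.mp hp
      have := (List.mem_filter.mp hq).2
      simpa using this
    · intro v hv
      beta_reduce
      rw [hblk v hv, List.length_map]
      exact (pvZipIdxFilter subs v 0).1
  -- now compute the function's value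
  have hVne : V ≠ [] := by
    cases hs : subs with
    | nil => exact absurd hs hsne
    | cons s t =>
        intro hVnil
        have : s ∈ V := (hVmem s).mpr (by rw [hs]; simp)
        rw [hVnil] at this
        exact List.not_mem_nil this
  set f : String → String × Int × Int :=
    fun v => (v, (List.count v subs : Int), ((List.idxOf v subs : Nat) : Int)) with hf
  cases hVc : V with
  | nil => exact absurd hVc hVne
  | cons v0 V' =>
      have hval : get_delimiter_alt xs =
          ((V'.map f).foldl
            (fun b r => if r.2.1 > b.2.1 ∨ (r.2.1 = b.2.1 ∧ r.2.2 < b.2.2) then r else b)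
            (f v0)).1 := by
        simp only [get_delimiter_alt]
        rw [← hsubs, if_neg hsne, hpairs, hruns, hVc]
        simp only [List.map_cons]
      rw [hval]
      obtain ⟨hmem, hbeats⟩ := pvSelect (V'.map f) (f v0)
      set res := (V'.map f).foldl
        (fun b r => if r.2.1 > b.2.1 ∨ (r.2.1 = b.2.1 ∧ r.2.2 < b.2.2) then r else b) (f v0)
        with hres
      have hmem' : res ∈ V.map f := by rw [hVc, List.map_cons]; exact hmem
      obtain ⟨vstar, hvstar, hresf⟩ := List.mem_map.mp hmem'
      have hres1 : res.1 = vstar := by rw [← hresf]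
      rw [hres1]
      refine ⟨(hVmem vstar).mp hvstar, ?_⟩
      intro u hu
      have huV : u ∈ V := (hVmem u).mpr hu
      have hfu : f u ∈ f v0 :: V'.map f := by
        rw [show f v0 :: V'.map f = V.map f from by rw [hVc, List.map_cons]]
        exact List.mem_map.mpr ⟨u, huV, rfl⟩
      obtain ⟨h1, h2⟩ := hbeats (f u) hfu
      rw [← hresf] at h1 h2
      simp only [hf] at h1 h2
      constructor
      · exact_mod_cast h1
      · intro hcnt
        have := h2 (by exact_mod_cast hcnt)
        exact_mod_cast this
-- A's first loop produces the substring list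
theorem pvA_subs (xs : List String) :
    (PySem.List.pyRange 0 (PySem.List.len xs) 1).foldl
        (fun acc i =>
          acc ++ [PySem.Str.slice (PySem.List.pyGetD xs i "") (some (-6)) (some (-4))]) []
      = xs.map (fun s => PySem.Str.slice s (some (-6)) (some (-4))) := by
  rw [PySem.List.foldl_append_singleton_eq_map]
  rw [show (fun i => PySem.Str.slice (PySem.List.pyGetD xs i "") (some (-6)) (some (-4)))
        = (fun s => PySem.Str.slice s (some (-6)) (some (-4))) ∘ (fun i => PySem.List.pyGetD xs i "") from rfl]
  rw [← List.map_map, PySem.List.map_pyGetD_pyRange_zero xs ""]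
  simp

-- ===== VERDICT =====
theorem get_delimiter_spec : Claim_equal_get_delimiter := by
  intro xs _ hpre
  show get_delimiter xs = get_delimiter_alt xs
  have hne : xs.map (fun s => PySem.Str.slice s (some (-6)) (some (-4))) ≠ [] := by
    simpa using hpre
  refine pvBest_unique ?_ (pvB_best xs hpre)
  show pvBest _ (get_delimiter xs)
  simp only [get_delimiter, pvA_subs]
  simp only [PySem.List.count_eq]
  exact pvA_best _ hne
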